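-- pv_equiv track=rewrite | github.com/vakker/HetSAGE | sql2graph.py | clear_str
-- ===== SOURCE A (Python) =====
-- def clear_str(string):
--     str_map = [
--         ['-', '_'],
--         [' ', ''],
--         [',', ''],
--     ]
--     string = string.lower()
--     for old, new in str_map:
--         string = string.replace(old, new)
--     return string
-- ===== SOURCE B (Python) =====
-- def clear_str(string):
--     out = []
--     for ch in string.lower():
--         if ch == '-':
--             out.append('_')
--         elif ch != ' ' and ch != ',':
--             out.append(ch)
--     return ''.join(out)
-- ===== Notes on version B (the rewrite author's own statement) =====
-- stated objective: idiomatic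
-- what changed: Replaces the loop of three whole-string str.replace passes by a single character-by-character pass over the lowered string that emits '_' for '-', drops ' ' and ',', and copies everything else.
import Mathlib
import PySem

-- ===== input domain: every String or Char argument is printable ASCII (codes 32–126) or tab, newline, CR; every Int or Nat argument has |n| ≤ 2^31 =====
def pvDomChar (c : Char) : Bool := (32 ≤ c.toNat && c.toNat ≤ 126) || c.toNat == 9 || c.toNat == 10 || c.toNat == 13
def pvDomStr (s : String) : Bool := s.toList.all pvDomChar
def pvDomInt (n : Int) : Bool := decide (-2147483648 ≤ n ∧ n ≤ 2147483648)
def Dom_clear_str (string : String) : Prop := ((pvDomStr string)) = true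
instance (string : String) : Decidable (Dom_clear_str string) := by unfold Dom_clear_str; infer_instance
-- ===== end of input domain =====

-- B lowercases once and makes a single character pass instead of A's three whole-string replace passes (idiomatic; same return value).

-- ===== PORT A =====
def clear_str (string : String) : String :=
  let str_map : List (String × String) := [("-", "_"), (" ", ""), (",", "")]
  let string := PySem.Str.lower string
  str_map.foldl (fun s p => PySem.Str.replace s p.1 p.2) string

-- ===== PORT B =====
def clear_str_alt (string : String) : String :=
  let out : List Char :=
    (PySem.Str.lower string).toList.foldl
      (fun out ch =>
        if ch = '-' then out ++ ['_']
        else if ch ≠ ' ' ∧ ch ≠ ',' then out ++ [ch]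
        else out) []
  String.ofList out

-- ===== PRECONDITION & SPEC =====
def Spec_clear_str (string : String) (out : String) : Prop := out = clear_str_alt string
instance (string : String) (out : String) : Decidable (Spec_clear_str string out) := by unfold Spec_clear_str; infer_instance

-- ===== CLAIM (what is proved, stated in full; the proofs are below) =====
def Claim_equal_clear_str : Prop := ∀ (string : String), Dom_clear_str string → Spec_clear_str string (clear_str string)

-- ===== LEMMAS AND PROOFS =====

-- single pass as a flatMap: B's loop body emits [ '_' ], [] or [ch] per character
def pvEmit (c : Char) : List Char :=
  if c = '-' then ['_'] else if c ≠ ' ' ∧ c ≠ ',' then [c] else []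

lemma pv_foldl_emit (l : List Char) (acc : List Char) :
    l.foldl (fun out ch =>
        if ch = '-' then out ++ ['_']
        else if ch ≠ ' ' ∧ ch ≠ ',' then out ++ [ch]
        else out) acc = acc ++ l.flatMap pvEmit := by
  induction l generalizing acc with
  | nil => simp
  | cons c t ih =>
    simp only [List.foldl_cons, List.flatMap_cons, pvEmit]
    split_ifs with h1 h2 <;> simp [ih, List.append_assoc]

-- replace by a single character = per-character flatMap
lemma pv_replace_go_single (o : Char) (new : List Char) (l acc : List Char) (fuel : Nat)
    (h : l.length ≤ fuel) :
    PySem.Chars.replace.go [o] new fuel l acc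
      = acc.reverse ++ l.flatMap (fun c => if c = o then new else [c]) := by
  induction l generalizing fuel acc with
  | nil =>
    cases fuel <;> simp [PySem.Chars.replace.go]
  | cons c t ih =>
    cases fuel with
    | zero => simp at h
    | succ n =>
      simp only [PySem.Chars.replace.go]
      by_cases hc : c = o
      · have hp : List.isPrefixOf [o] (c :: t) = true := by
          simp [List.isPrefixOf, hc]
        simp only [hc, List.flatMap_cons]
        rw [show List.drop (List.length [o]) (o :: t) = t by simp]
        rw [ih (new.reverse ++ acc) n (by simpa using Nat.le_of_succ_le_succ (by simpa using h))]
        simp [List.append_assoc]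
      · have hp : List.isPrefixOf [o] (c :: t) = false := by
          simp [List.isPrefixOf]
          exact fun h' => (hc h'.symm).elim
        simp only [hp, Bool.false_eq_true, if_false, List.flatMap_cons, if_neg hc]
        rw [ih (c :: acc) n (by simpa using Nat.le_of_succ_le_succ (by simpa using h))]
        simp

lemma pv_replace_single (o : Char) (new s : List Char) :
    PySem.Chars.replace s [o] new = s.flatMap (fun c => if c = o then new else [c]) := by
  rw [PySem.Chars.replace]
  simp only [List.isEmpty_cons, Bool.false_eq_true, if_false]
  exact pv_replace_go_single o new s [] s.length le_rfl

lemma pv_flatMap_flatMap (f g : Char → List Char) (s : List Char) :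
    (s.flatMap f).flatMap g = s.flatMap (fun c => (f c).flatMap g) := by
  simp [List.flatMap_assoc]

theorem pv_main (string : String) : clear_str string = clear_str_alt string := by
  unfold clear_str clear_str_alt
  simp only [List.foldl_cons, List.foldl_nil]
  rw [pv_foldl_emit]
  apply String.ext  -- strings equal iff their data (toList) equal
  simp only [PySem.Str.toList_replace, String.toList_ofList, List.nil_append]
  have h1 : ("-" : String).toList = ['-'] := rfl
  have h2 : ("_" : String).toList = ['_'] := rfl
  have h3 : (" " : String).toList = [' '] := rfl
  have h4 : ("," : String).toList = [','] := rfl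
  have h5 : ("" : String).toList = [] := rfl
  rw [h1, h2, h3, h4, h5]
  rw [pv_replace_single, pv_replace_single, pv_replace_single,
      pv_flatMap_flatMap, pv_flatMap_flatMap]
  apply List.flatMap_congr
  intro c _
  unfold pvEmit
  by_cases hd : c = '-'
  · simp [hd]
  · by_cases hs : c = ' '
    · simp [hs]
    · by_cases hk : c = ','
      · simp [hk]
      · simp [hd, hs, hk]

-- ===== VERDICT (by name: the statement is the Claim_ definition above) =====
theorem clear_str_spec : Claim_equal_clear_str :=
  fun string _ => pv_main string
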